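-- pv_equiv track=rewrite | github.com/MrBrantCode/unitest_baseline | mut_generate/mist_train_taco/taco_14228/solution.py | playingWithNumbers
-- ===== SOURCE A (Python) =====
-- from collections import Counter
--
-- def playingWithNumbers(arr, queries):
--     positive_n = [el for el in arr if el >= 0]
--     negative_n = [el for el in arr if el < 0]
--     pos_size = len(positive_n)
--     neg_size = len(negative_n)
--     positive = list(reversed(sorted(Counter(positive_n).items())))
--     negative = sorted(Counter(negative_n).items())
--     tot = sum((abs(el) for el in arr))
--     diff = 0
--     results = []
--
--     for q in queries:
--         diff += q
--         tot += pos_size * q - neg_size * q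
--         if q > 0:
--             while neg_size and negative[-1][0] + diff >= 0:
--                 (n, count) = negative.pop()
--                 positive.append((n, count))
--                 pos_size += count
--                 neg_size -= count
--                 tot += abs(n + diff) * 2 * count
--         else:
--             while pos_size and positive[-1][0] + diff < 0:
--                 (n, count) = positive.pop()
--                 negative.append((n, count))
--                 neg_size += count
--                 pos_size -= count
--                 tot += abs(n + diff) * 2 * count
--         results.append(tot)
--
--     return results
-- ===== SOURCE B (Python) =====
-- def _count_less(s, t):
--     lo, hi = 0, len(s)
--     while lo < hi:
--         mid = (lo + hi) // 2
--         if s[mid] < t: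
--             lo = mid + 1
--         else:
--             hi = mid
--     return lo
--
-- def playingWithNumbers(arr, queries):
--     s = sorted(arr)
--     n = len(s)
--     prefix = [0]
--     acc = 0
--     for x in s:
--         acc += x
--         prefix.append(acc)
--     total = prefix[n]
--     res = []
--     d = 0
--     for q in queries:
--         d += q
--         j = _count_less(s, -d)
--         res.append(total - 2 * prefix[j] + (n - 2 * j) * d)
--     return res
-- ===== Notes on version B (the rewrite author's own statement) =====
-- stated objective: faster
-- what changed: B replaces A's incremental two-counter-stack bookkeeping (moving Counter items between a positive and a negative pile per query) by sorting arr once, precomputing prefix sums, and answering each query with a binary search for the sign split point and a closed-form formula.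
import Mathlib
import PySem

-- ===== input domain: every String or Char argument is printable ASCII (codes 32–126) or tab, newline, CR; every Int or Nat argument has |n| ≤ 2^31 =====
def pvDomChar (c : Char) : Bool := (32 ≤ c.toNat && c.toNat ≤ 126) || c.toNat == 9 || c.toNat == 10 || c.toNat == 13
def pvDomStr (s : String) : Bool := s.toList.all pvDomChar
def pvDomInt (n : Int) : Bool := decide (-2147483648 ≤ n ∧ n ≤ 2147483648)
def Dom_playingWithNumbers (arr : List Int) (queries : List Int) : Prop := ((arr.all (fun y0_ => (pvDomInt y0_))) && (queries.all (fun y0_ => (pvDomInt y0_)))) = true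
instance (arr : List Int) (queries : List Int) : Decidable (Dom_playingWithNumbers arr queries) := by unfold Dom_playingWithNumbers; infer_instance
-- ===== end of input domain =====

-- B replaces A's per-query counter-pile shuffling by sort + pfx sums + binary search per query (faster).
-- ===== PORT A =====
-- while loop 'while neg_size and negative[-1][0] + diff >= 0: pop the largest negative item over to positive'
def pvMoveUp (negative positive : List (Int × Int)) (diff posSize negSize tot : Int) :
    List (Int × Int) × List (Int × Int) × Int × Int × Int :=
  match h : negative.getLast? with
  | none => (negative, positive, posSize, negSize, tot)
  | some (n, c) =>
    if negSize ≠ 0 ∧ n + diff ≥ 0 then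
      pvMoveUp negative.dropLast (positive ++ [(n, c)]) diff (posSize + c) (negSize - c)
        (tot + |n + diff| * 2 * c)
    else (negative, positive, posSize, negSize, tot)
termination_by negative.length
decreasing_by
  have hne : negative ≠ [] := by intro hn; simp [hn] at h
  have : 0 < negative.length := List.length_pos_of_ne_nil hne
  simp [List.length_dropLast]
  omega

-- while loop 'while pos_size and positive[-1][0] + diff < 0: pop the smallest positive item over to negative'
def pvMoveDown (negative positive : List (Int × Int)) (diff posSize negSize tot : Int) :
    List (Int × Int) × List (Int × Int) × Int × Int × Int :=
  match h : positive.getLast? with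
  | none => (negative, positive, posSize, negSize, tot)
  | some (n, c) =>
    if posSize ≠ 0 ∧ n + diff < 0 then
      pvMoveDown (negative ++ [(n, c)]) positive.dropLast diff (posSize - c) (negSize + c)
        (tot + |n + diff| * 2 * c)
    else (negative, positive, posSize, negSize, tot)
termination_by positive.length
decreasing_by
  have hne : positive ≠ [] := by intro hn; simp [hn] at h
  have : 0 < positive.length := List.length_pos_of_ne_nil hne
  simp [List.length_dropLast]
  omega

-- the 'for q in queries' loop, appending one total per query
def pvRun (queries : List Int) (negative positive : List (Int × Int))
    (diff posSize negSize tot : Int) : List Int :=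
  match queries with
  | [] => []
  | q :: qs =>
    let diff' := diff + q
    let tot' := tot + posSize * q - negSize * q
    if q > 0 then
      match pvMoveUp negative positive diff' posSize negSize tot' with
      | (neg', pos', posSize', negSize', tot'') =>
        tot'' :: pvRun qs neg' pos' diff' posSize' negSize' tot''
    else
      match pvMoveDown negative positive diff' posSize negSize tot' with
      | (neg', pos', posSize', negSize', tot'') =>
        tot'' :: pvRun qs neg' pos' diff' posSize' negSize' tot''

-- Counter items have distinct keys, so Python's tuple sort of the items = sort by key
def playingWithNumbers (arr : List Int) (queries : List Int) : List Int :=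
  let positive_n := arr.filter (fun el => el ≥ 0)
  let negative_n := arr.filter (fun el => el < 0)
  let pos_size : Int := PySem.List.len positive_n
  let neg_size : Int := PySem.List.len negative_n
  let positive := (PySem.List.sorted (PySem.Dict.counter positive_n).items (fun p => p.1) false).reverse
  let negative := PySem.List.sorted (PySem.Dict.counter negative_n).items (fun p => p.1) false
  let tot := (arr.map (fun el => |el|)).sum
  pvRun queries negative positive 0 pos_size neg_size tot

-- ===== PORT B =====
-- _count_less: hand-written binary search of Source B (bisect may not be imported there), ported literally
def pvCountLessLoop (s : List Int) (t lo hi : Int) : Int :=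
  if h : lo < hi then
    let mid := PySem.Int.floordiv (lo + hi) 2
    if PySem.List.pyGetD s mid 0 < t then pvCountLessLoop s t (mid + 1) hi
    else pvCountLessLoop s t lo mid
  else lo
termination_by (hi - lo).toNat
decreasing_by
  · have _h1 := PySem.Int.floordiv_two_mid_bounds (le_of_lt h)
    have h2 : PySem.Int.floordiv (lo + hi) 2 < hi := by
      rw [PySem.Int.floordiv_lt_iff_lt_mul (by omega)]; omega
    omega
  · have _h1 := PySem.Int.floordiv_two_mid_bounds (le_of_lt h)
    have h2 : PySem.Int.floordiv (lo + hi) 2 < hi := by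
      rw [PySem.Int.floordiv_lt_iff_lt_mul (by omega)]; omega
    omega

def pvCountLess (s : List Int) (t : Int) : Int :=
  pvCountLessLoop s t 0 (PySem.List.len s)

-- the 'for q in queries' loop of Source B
def pvAltRun (queries : List Int) (s pfx : List Int) (n total d : Int) : List Int :=
  match queries with
  | [] => []
  | q :: qs =>
    let d' := d + q
    let j := pvCountLess s (-d')
    (total - 2 * PySem.List.pyGetD pfx j 0 + (n - 2 * j) * d') ::
      pvAltRun qs s pfx n total d'

def playingWithNumbers_alt (arr : List Int) (queries : List Int) : List Int :=
  let s := PySem.List.sorted arr (fun x => x) false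
  let n : Int := PySem.List.len s
  let pfx := (s.foldl (fun (st : List Int × Int) x => (st.1 ++ [st.2 + x], st.2 + x)) ([0], 0)).1
  let total := PySem.List.pyGetD pfx n 0
  pvAltRun queries s pfx n total 0

-- ===== PRECONDITION & SPEC =====
def Spec_playingWithNumbers (arr : List Int) (queries : List Int) (out : List Int) : Prop := out = playingWithNumbers_alt arr queries
instance (arr : List Int) (queries : List Int) (out : List Int) : Decidable (Spec_playingWithNumbers arr queries out) := by unfold Spec_playingWithNumbers; infer_instance

-- ===== CLAIM (what is proved, stated in full; the proofs are below) =====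
def Claim_equal_playingWithNumbers : Prop := ∀ (arr : List Int) (queries : List Int), Dom_playingWithNumbers arr queries → Spec_playingWithNumbers arr queries (playingWithNumbers arr queries)

-- ===== LEMMAS AND PROOFS =====

-- both sides are shown to produce, query by query, the running value Σ_{x∈arr} |x + d|
def pvSpec (d : Int) (arr : List Int) : Int := (arr.map (fun x => |x + d|)).sum

def pvSpecList (queries : List Int) (arr : List Int) (d : Int) : List Int :=
  match queries with
  | [] => []
  | q :: qs => pvSpec (d + q) arr :: pvSpecList qs arr (d + q)

def pvS1 (l : List (Int × Int)) : Int := (l.map (fun p => p.2)).sum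
def pvT (d : Int) (l : List (Int × Int)) : Int := (l.map (fun p => p.2 * |p.1 + d|)).sum
def pvN (d : Int) (l : List (Int × Int)) : Int := (l.map (fun p => p.2 * (-(p.1 + d)))).sum
def pvP (d : Int) (l : List (Int × Int)) : Int := (l.map (fun p => p.2 * (p.1 + d))).sum

def pvInv (arr : List Int) (neg pos : List (Int × Int)) : Prop :=
  ((neg ++ pos.reverse).map (fun p => p.1)).Pairwise (· < ·) ∧
  (∀ p ∈ neg ++ pos, 1 ≤ p.2) ∧
  (∀ d, pvT d neg + pvT d pos = pvSpec d arr)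

lemma pvS1_append (l1 l2 : List (Int × Int)) : pvS1 (l1 ++ l2) = pvS1 l1 + pvS1 l2 := by
  simp [pvS1]

lemma pvT_append (d : Int) (l1 l2 : List (Int × Int)) : pvT d (l1 ++ l2) = pvT d l1 + pvT d l2 := by
  simp [pvT]

lemma pvN_append (d : Int) (l1 l2 : List (Int × Int)) : pvN d (l1 ++ l2) = pvN d l1 + pvN d l2 := by
  simp [pvN]

lemma pvP_append (d : Int) (l1 l2 : List (Int × Int)) : pvP d (l1 ++ l2) = pvP d l1 + pvP d l2 := by
  simp [pvP]

lemma pvN_shift (d q : Int) (l : List (Int × Int)) : pvN (d + q) l = pvN d l - q * pvS1 l := by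
  induction l with
  | nil => simp [pvN, pvS1]
  | cons p l ih => simp [pvN, pvS1] at ih ⊢; linarith

lemma pvP_shift (d q : Int) (l : List (Int × Int)) : pvP (d + q) l = pvP d l + q * pvS1 l := by
  induction l with
  | nil => simp [pvP, pvS1]
  | cons p l ih => simp [pvP, pvS1] at ih ⊢; linarith

lemma pvT_eq_pvN (d : Int) (l : List (Int × Int)) (h : ∀ p ∈ l, p.1 + d < 0) : pvT d l = pvN d l := by
  unfold pvT pvN
  congr 1
  apply List.map_congr_left
  intro p hp
  rw [abs_of_neg (h p hp)]

lemma pvT_eq_pvP (d : Int) (l : List (Int × Int)) (h : ∀ p ∈ l, 0 ≤ p.1 + d) : pvT d l = pvP d l := by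
  unfold pvT pvP
  congr 1
  apply List.map_congr_left
  intro p hp
  rw [abs_of_nonneg (h p hp)]

lemma pvS1_nonneg (l : List (Int × Int)) (h : ∀ p ∈ l, 1 ≤ p.2) : 0 ≤ pvS1 l := by
  apply List.sum_nonneg
  intro x hx
  obtain ⟨p, hp, rfl⟩ := List.mem_map.mp hx
  have := h p hp
  omega

theorem pvMoveUp_spec (arr : List Int) (d : Int) (neg : List (Int × Int)) :
    ∀ (pos : List (Int × Int)) (tot : Int),
    pvInv arr neg pos →
    (∀ p ∈ pos, 0 ≤ p.1 + d) →
    tot = pvN d neg + pvT d pos →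
    ∃ neg' pos',
      pvMoveUp neg pos d (pvS1 pos) (pvS1 neg) tot
        = (neg', pos', pvS1 pos', pvS1 neg', pvT d neg' + pvT d pos') ∧
      pvInv arr neg' pos' ∧ (∀ p ∈ neg', p.1 + d < 0) ∧ (∀ p ∈ pos', 0 ≤ p.1 + d) := by
  induction neg using List.reverseRecOn with
  | nil =>
    intro pos tot hInv hpos htot
    refine ⟨[], pos, ?_, hInv, by simp, hpos⟩
    rw [pvMoveUp]
    simp [pvN, pvT] at htot ⊢
    omega
  | append_singleton ys x ih =>
    intro pos tot hInv hpos htot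
    obtain ⟨n, c⟩ := x
    obtain ⟨hpair, hcnt, hspec⟩ := hInv
    have hassoc : ∀ (zs : List (Int × Int)), ys ++ (zs ++ [(n, c)]).reverse = (ys ++ [(n, c)]) ++ zs.reverse := by
      intro zs; simp
    rw [pvMoveUp]
    split
    next heq => rw [List.getLast?_concat] at heq; cases heq
    next n' c' heq =>
    rw [List.getLast?_concat] at heq
    injection heq with h2
    injection h2 with h3 h4
    subst h3; subst h4
    by_cases hcond : pvS1 (ys ++ [(n, c)]) ≠ 0 ∧ n + d ≥ 0
    · rw [if_pos hcond]
      rw [List.dropLast_concat]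
      have hS1 : pvS1 (ys ++ [(n, c)]) - c = pvS1 ys := by simp [pvS1]
      have hS2 : pvS1 pos + c = pvS1 (pos ++ [(n, c)]) := by simp [pvS1]
      rw [hS1, hS2]
      have hInv' : pvInv arr ys (pos ++ [(n, c)]) := by
        refine ⟨?_, ?_, ?_⟩
        · rw [hassoc]; exact hpair
        · intro p hp
          apply hcnt
          simp at hp ⊢
          tauto
        · intro d'
          have h5 := hspec d'
          rw [pvT_append] at h5
          rw [pvT_append]
          linarith
      have hpos' : ∀ p ∈ pos ++ [(n, c)], 0 ≤ p.1 + d := by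
        intro p hp
        rcases List.mem_append.mp hp with h | h
        · exact hpos p h
        · simp at h; subst h; simpa using hcond.2
      have htot' : tot + |n + d| * 2 * c = pvN d ys + pvT d (pos ++ [(n, c)]) := by
        rw [htot, pvN_append, pvT_append]
        simp [pvN, pvT]
        rw [abs_of_nonneg (show (0:Int) ≤ n + d by omega)]
        ring
      exact ih (pos ++ [(n, c)]) (tot + |n + d| * 2 * c) hInv' hpos' htot'
    · rw [if_neg hcond]
      -- counts are ≥ 1, so the size guard cannot be the reason: n + d < 0
      have hc1 : 1 ≤ c := by
        have : (n, c) ∈ (ys ++ [(n, c)]) ++ pos := by simp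
        exact hcnt (n, c) this
      have hys0 : 0 ≤ pvS1 ys := by
        apply pvS1_nonneg
        intro p hp
        apply hcnt
        simp [hp]
      have hsz : pvS1 (ys ++ [(n, c)]) ≠ 0 := by
        rw [pvS1_append]
        simp [pvS1] at hys0 ⊢
        omega
      have hnd : n + d < 0 := by
        by_contra h
        exact hcond ⟨hsz, by omega⟩
      -- every key in ys is below n, so all of neg is still negative
      have hkeys : ∀ p ∈ ys, p.1 < n := by
        intro p hp
        have h1 : ((ys ++ [(n, c)]).map (fun p => p.1)).Pairwise (· < ·) := by
          rw [List.map_append] at hpair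
          exact (List.pairwise_append.mp hpair).1
        rw [List.map_append, List.pairwise_append] at h1
        exact h1.2.2 p.1 (List.mem_map_of_mem hp) n (by simp)
      have hneg' : ∀ p ∈ ys ++ [(n, c)], p.1 + d < 0 := by
        intro p hp
        rcases List.mem_append.mp hp with h | h
        · have := hkeys p h; omega
        · simp at h; subst h; simpa using hnd
      refine ⟨ys ++ [(n, c)], pos, ?_, ⟨hpair, hcnt, hspec⟩, hneg', hpos⟩
      rw [htot, pvT_eq_pvN d (ys ++ [(n, c)]) hneg']

theorem pvMoveDown_spec (arr : List Int) (d : Int) (pos : List (Int × Int)) :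
    ∀ (neg : List (Int × Int)) (tot : Int),
    pvInv arr neg pos →
    (∀ p ∈ neg, p.1 + d < 0) →
    tot = pvT d neg + pvP d pos →
    ∃ neg' pos',
      pvMoveDown neg pos d (pvS1 pos) (pvS1 neg) tot
        = (neg', pos', pvS1 pos', pvS1 neg', pvT d neg' + pvT d pos') ∧
      pvInv arr neg' pos' ∧ (∀ p ∈ neg', p.1 + d < 0) ∧ (∀ p ∈ pos', 0 ≤ p.1 + d) := by
  induction pos using List.reverseRecOn with
  | nil =>
    intro neg tot hInv hneg htot
    refine ⟨neg, [], ?_, hInv, hneg, by simp⟩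
    rw [pvMoveDown]
    simp [pvP, pvT, htot]
  | append_singleton zs x ih =>
    intro neg tot hInv hneg htot
    obtain ⟨n, c⟩ := x
    obtain ⟨hpair, hcnt, hspec⟩ := hInv
    rw [pvMoveDown]
    split
    next heq => rw [List.getLast?_concat] at heq; cases heq
    next n' c' heq =>
    rw [List.getLast?_concat] at heq
    injection heq with h2
    injection h2 with h3 h4
    subst h3; subst h4
    by_cases hcond : pvS1 (zs ++ [(n, c)]) ≠ 0 ∧ n + d < 0
    · rw [if_pos hcond]
      rw [List.dropLast_concat]
      have hS1 : pvS1 (zs ++ [(n, c)]) - c = pvS1 zs := by simp [pvS1]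
      have hS2 : pvS1 neg + c = pvS1 (neg ++ [(n, c)]) := by simp [pvS1]
      rw [hS1, hS2]
      have hInv' : pvInv arr (neg ++ [(n, c)]) zs := by
        refine ⟨?_, ?_, ?_⟩
        · have : neg ++ (zs ++ [(n, c)]).reverse = (neg ++ [(n, c)]) ++ zs.reverse := by simp
          rw [this] at hpair
          exact hpair
        · intro p hp
          apply hcnt
          simp at hp ⊢
          tauto
        · intro d'
          have h5 := hspec d'
          rw [pvT_append] at h5
          rw [pvT_append]
          linarith
      have hneg' : ∀ p ∈ neg ++ [(n, c)], p.1 + d < 0 := by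
        intro p hp
        rcases List.mem_append.mp hp with h | h
        · exact hneg p h
        · simp at h; subst h; simpa using hcond.2
      have htot' : tot + |n + d| * 2 * c = pvT d (neg ++ [(n, c)]) + pvP d zs := by
        rw [htot, pvT_append, pvP_append]
        simp [pvP, pvT]
        rw [abs_of_neg (show n + d < 0 by omega)]
        ring
      exact ih (neg ++ [(n, c)]) (tot + |n + d| * 2 * c) hInv' hneg' htot'
    · rw [if_neg hcond]
      have hc1 : 1 ≤ c := by
        have : (n, c) ∈ neg ++ (zs ++ [(n, c)]) := by simp
        exact hcnt (n, c) this
      have hzs0 : 0 ≤ pvS1 zs := by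
        apply pvS1_nonneg
        intro p hp
        apply hcnt
        simp [hp]
      have hsz : pvS1 (zs ++ [(n, c)]) ≠ 0 := by
        rw [pvS1_append]
        simp [pvS1] at hzs0 ⊢
        omega
      have hnd : 0 ≤ n + d := by
        by_contra h
        exact hcond ⟨hsz, by omega⟩
      -- n is the smallest key of the positive pile: pos.reverse starts with (n, c)
      have hkeys : ∀ p ∈ zs, n < p.1 := by
        intro p hp
        have h1 : ((zs ++ [(n, c)]).reverse.map (fun p => p.1)).Pairwise (· < ·) := by
          rw [List.map_append] at hpair
          exact ((List.pairwise_append.mp hpair).2.1).imp (fun h => h) |>.imp id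
        rw [List.reverse_append] at h1
        simp only [List.reverse_singleton, List.singleton_append, List.map_cons] at h1
        rcases List.pairwise_cons.mp h1 with ⟨hhd, _⟩
        exact hhd p.1 (by rw [List.map_reverse]; exact List.mem_reverse.mpr (List.mem_map_of_mem hp))
      have hpos' : ∀ p ∈ zs ++ [(n, c)], 0 ≤ p.1 + d := by
        intro p hp
        rcases List.mem_append.mp hp with h | h
        · have := hkeys p h; omega
        · simp at h; subst h; simpa using hnd
      refine ⟨neg, zs ++ [(n, c)], ?_, ⟨hpair, hcnt, hspec⟩, hneg, hpos'⟩
      rw [htot, pvT_eq_pvP d (zs ++ [(n, c)]) hpos']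

theorem pvRun_spec (qs : List Int) (arr : List Int) (neg pos : List (Int × Int)) (d : Int)
    (hInv : pvInv arr neg pos)
    (hneg : ∀ p ∈ neg, p.1 + d < 0) (hpos : ∀ p ∈ pos, 0 ≤ p.1 + d) :
    pvRun qs neg pos d (pvS1 pos) (pvS1 neg) (pvT d neg + pvT d pos) = pvSpecList qs arr d := by
  induction qs generalizing neg pos d with
  | nil => simp [pvRun, pvSpecList]
  | cons q qs ih =>
    rw [pvRun, pvSpecList]
    by_cases hq : q > 0
    · rw [if_pos hq]
      have hpos' : ∀ p ∈ pos, 0 ≤ p.1 + (d + q) := by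
        intro p hp; have := hInv.2.2; have := hpos p hp; omega
      have htot' : pvT d neg + pvT d pos + pvS1 pos * q - pvS1 neg * q
          = pvN (d + q) neg + pvT (d + q) pos := by
        rw [pvT_eq_pvN d neg hneg, pvT_eq_pvP d pos hpos, pvT_eq_pvP (d + q) pos hpos',
          pvN_shift, pvP_shift]
        ring
      rw [htot']
      obtain ⟨neg', pos', heq, hInv', hneg', hpos''⟩ :=
        pvMoveUp_spec arr (d + q) neg pos (pvN (d + q) neg + pvT (d + q) pos) hInv hpos' rfl
      rw [heq]
      exact congrArg₂ _ (hInv'.2.2 (d + q)) (ih neg' pos' (d + q) hInv' hneg' hpos'')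
    · rw [if_neg hq]
      have hneg' : ∀ p ∈ neg, p.1 + (d + q) < 0 := by
        intro p hp; have := hneg p hp; omega
      have htot' : pvT d neg + pvT d pos + pvS1 pos * q - pvS1 neg * q
          = pvT (d + q) neg + pvP (d + q) pos := by
        rw [pvT_eq_pvN d neg hneg, pvT_eq_pvN (d + q) neg hneg', pvT_eq_pvP d pos hpos,
          pvN_shift, pvP_shift]
        ring
      rw [htot']
      obtain ⟨neg', pos', heq, hInv', hneg'', hpos'⟩ :=
        pvMoveDown_spec arr (d + q) pos neg (pvT (d + q) neg + pvP (d + q) pos) hInv hneg' rfl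
      rw [heq]
      exact congrArg₂ _ (hInv'.2.2 (d + q)) (ih neg' pos' (d + q) hInv' hneg'' hpos')

lemma pvSumIte (f : Int → Int) (ks : List Int) (x : Int) (hnd : ks.Nodup) (hx : x ∈ ks) :
    (ks.map (fun k => if k = x then f k else 0)).sum = f x := by
  induction ks with
  | nil => cases hx
  | cons k ks ih =>
    rcases List.mem_cons.mp hx with rfl | hx'
    · have hnot : x ∉ ks := (List.nodup_cons.mp hnd).1
      have hz : (ks.map (fun k => if k = x then f k else 0)).sum = 0 := by
        apply List.sum_eq_zero
        intro y hy
        obtain ⟨k', hk', rfl⟩ := List.mem_map.mp hy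
        rw [if_neg (by rintro rfl; exact hnot hk')]
      simp [hz]
    · have hkx : k ≠ x := by rintro rfl; exact (List.nodup_cons.mp hnd).1 hx'
      simp only [List.map_cons, List.sum_cons, if_neg hkx]
      rw [ih (List.nodup_cons.mp hnd).2 hx']
      omega

lemma pvCountSum (f : Int → Int) (xs : List Int) : ∀ (ks : List Int), ks.Nodup →
    (∀ x ∈ xs, x ∈ ks) →
    (ks.map (fun k => (xs.count k : Int) * f k)).sum = (xs.map f).sum := by
  induction xs with
  | nil => intro ks _ _; simp
  | cons x xs ih =>
    intro ks hnd hsub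
    have hsub' : ∀ y ∈ xs, y ∈ ks := fun y hy => hsub y (List.mem_cons_of_mem x hy)
    have hx : x ∈ ks := hsub x List.mem_cons_self
    have hcnt : ∀ k, ((x :: xs).count k : Int) * f k
        = (xs.count k : Int) * f k + (if k = x then f k else 0) := by
      intro k
      by_cases h : k = x
      · subst h; rw [List.count_cons_self]; simp; ring
      · rw [List.count_cons_of_ne (by exact fun hh => h hh.symm)]
        simp [h]
    calc (ks.map (fun k => ((x :: xs).count k : Int) * f k)).sum
        = (ks.map (fun k => (xs.count k : Int) * f k + (if k = x then f k else 0))).sum := by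
          congr 1; exact List.map_congr_left (fun k _ => hcnt k)
      _ = (ks.map (fun k => (xs.count k : Int) * f k)).sum
            + (ks.map (fun k => if k = x then f k else 0)).sum := by
          rw [PySem.List.sum_map_add_int]
      _ = (xs.map f).sum + f x := by rw [ih ks hnd hsub', pvSumIte f ks x hnd hx]
      _ = ((x :: xs).map f).sum := by simp; omega

-- facts about sorted(Counter(xs).items()): the canonical key-sorted count list
lemma pvItems_facts (xs : List Int) :
    (((PySem.List.sorted (PySem.Dict.counter xs).items (fun p => p.1) false).map (fun p => p.1)).Pairwise (· < ·)) ∧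
    (∀ p ∈ PySem.List.sorted (PySem.Dict.counter xs).items (fun p => p.1) false, 1 ≤ p.2 ∧ p.1 ∈ xs) ∧
    (∀ f : Int → Int, ((PySem.List.sorted (PySem.Dict.counter xs).items (fun p => p.1) false).map
        (fun p => p.2 * f p.1)).sum = (xs.map f).sum) := by
  set its := PySem.List.sorted (PySem.Dict.counter xs).items (fun p => p.1) false with hits
  have hperm : its.Perm (PySem.Dict.counter xs).items := PySem.List.sorted_perm _ _ _
  have hitems := PySem.Dict.items_counter xs
  refine ⟨?_, ?_, ?_⟩
  · have hle : its.Pairwise (fun a b => a.1 ≤ b.1) := PySem.List.sorted_pairwise _ _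
    have hndk : (its.map (fun p => p.1)).Nodup := by
      have h1 : (its.map (fun p => p.1)).Perm ((PySem.Dict.counter xs).items.map (fun p => p.1)) :=
        hperm.map _
      have h2 : ((PySem.Dict.counter xs).items.map (fun p => p.1)).Nodup :=
        PySem.Dict.nodup_keys_counter xs
      exact h1.nodup_iff.mpr h2
    have hndk' : (its.map (fun p => p.1)).Pairwise (· ≠ ·) := hndk
    rw [List.pairwise_map] at hndk' ⊢
    have := hle.and hndk'
    exact this.imp (fun ⟨h1, h2⟩ => lt_of_le_of_ne h1 h2)
  · intro p hp
    have hp' : p ∈ (PySem.Dict.counter xs).items := hperm.mem_iff.mp hp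
    rw [hitems] at hp'
    obtain ⟨k, hk, rfl⟩ := List.mem_map.mp hp'
    have hkxs : k ∈ xs := (PySem.Set.mem_ofList xs k).mp hk
    have : 0 < xs.count k := List.count_pos_iff.mpr hkxs
    exact ⟨by omega, hkxs⟩
  · intro f
    have h1 : (its.map (fun p => p.2 * f p.1)).sum
        = ((PySem.Dict.counter xs).items.map (fun p => p.2 * f p.1)).sum :=
      (hperm.map _).sum_eq
    rw [h1, hitems, List.map_map]
    have h2 : ((fun p : Int × Int => p.2 * f p.1) ∘ fun k => (k, (xs.count k : Int)))
        = fun k => (xs.count k : Int) * f k := by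
      funext k; simp
    rw [h2]
    exact pvCountSum f xs (PySem.Set.ofList xs) (PySem.Set.nodup_ofList xs)
      (fun x hx => (PySem.Set.mem_ofList xs x).mpr hx)

lemma pvSpec_filter (d : Int) (arr : List Int) :
    pvSpec d (arr.filter (fun el => el ≥ 0)) + pvSpec d (arr.filter (fun el => el < 0)) = pvSpec d arr := by
  have hperm := List.filter_append_perm (fun el : Int => el ≥ 0) arr
  have hf : arr.filter (fun el => !(decide (el ≥ 0))) = arr.filter (fun el => el < 0) := by
    apply List.filter_congr
    intro x _
    by_cases h : x ≥ 0
    · simp [h, show ¬ x < 0 by omega]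
    · simp [h, show x < 0 by omega]
  calc pvSpec d (arr.filter (fun el => el ≥ 0)) + pvSpec d (arr.filter (fun el => el < 0))
      = pvSpec d (arr.filter (fun el => el ≥ 0) ++ arr.filter (fun el => el < 0)) := by
        simp [pvSpec]
    _ = pvSpec d arr := by
        unfold pvSpec
        apply List.Perm.sum_eq
        apply List.Perm.map
        rw [← hf]
        exact hperm

lemma pvS1_items (xs : List Int) :
    pvS1 (PySem.List.sorted (PySem.Dict.counter xs).items (fun p => p.1) false) = (xs.length : Int) := by
  have h := (pvItems_facts xs).2.2 (fun _ => 1)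
  simp only [mul_one] at h
  unfold pvS1
  rw [h]
  simp [List.map_const']

lemma pvT_items (d : Int) (xs : List Int) :
    pvT d (PySem.List.sorted (PySem.Dict.counter xs).items (fun p => p.1) false) = pvSpec d xs := by
  exact (pvItems_facts xs).2.2 (fun x => |x + d|)

lemma pvS1_reverse (l : List (Int × Int)) : pvS1 l.reverse = pvS1 l := by
  simp [pvS1]

lemma pvT_reverse (d : Int) (l : List (Int × Int)) : pvT d l.reverse = pvT d l := by
  simp [pvT]

theorem pvA_eq (arr queries : List Int) :
    playingWithNumbers arr queries = pvSpecList queries arr 0 := by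
  unfold playingWithNumbers
  dsimp only
  have hposF := pvItems_facts (arr.filter (fun el : Int => el ≥ 0))
  have hnegF := pvItems_facts (arr.filter (fun el : Int => el < 0))
  set posI := PySem.List.sorted (PySem.Dict.counter (arr.filter (fun el : Int => el ≥ 0))).items (fun p => p.1) false with hposI
  set negI := PySem.List.sorted (PySem.Dict.counter (arr.filter (fun el : Int => el < 0))).items (fun p => p.1) false with hnegI
  have hInv : pvInv arr negI posI.reverse := by
    refine ⟨?_, ?_, ?_⟩
    · rw [List.reverse_reverse, List.map_append, List.pairwise_append]
      refine ⟨hnegF.1, hposF.1, ?_⟩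
      intro a ha b hb
      obtain ⟨p, hp, rfl⟩ := List.mem_map.mp ha
      obtain ⟨q, hq, rfl⟩ := List.mem_map.mp hb
      have h1 := (hnegF.2.1 p hp).2
      have h2 := (hposF.2.1 q hq).2
      rw [List.mem_filter] at h1 h2
      have := h1.2
      have := h2.2
      simp at *
      omega
    · intro p hp
      rcases List.mem_append.mp hp with h | h
      · exact ((hnegF.2.1 p h).1)
      · exact ((hposF.2.1 p (List.mem_reverse.mp h)).1)
    · intro d
      rw [pvT_reverse, pvT_items, pvT_items, ← pvSpec_filter d arr]
      omega
  have hneg0 : ∀ p ∈ negI, p.1 + 0 < 0 := by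
    intro p hp
    have h1 := (hnegF.2.1 p hp).2
    rw [List.mem_filter] at h1
    have := h1.2
    simp at this
    omega
  have hpos0 : ∀ p ∈ posI.reverse, 0 ≤ p.1 + 0 := by
    intro p hp
    have h1 := (hposF.2.1 p (List.mem_reverse.mp hp)).2
    rw [List.mem_filter] at h1
    have := h1.2
    simp at this
    omega
  have hrun := pvRun_spec queries arr negI posI.reverse 0 hInv hneg0 hpos0
  have e1 : PySem.List.len (arr.filter (fun el : Int => el ≥ 0)) = pvS1 posI.reverse := by
    rw [pvS1_reverse, hposI, pvS1_items, PySem.List.len_eq]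
  have e2 : PySem.List.len (arr.filter (fun el : Int => el < 0)) = pvS1 negI := by
    rw [hnegI, pvS1_items, PySem.List.len_eq]
  have e3 : (arr.map (fun el => |el|)).sum = pvT 0 negI + pvT 0 posI.reverse := by
    rw [hInv.2.2 0]
    unfold pvSpec
    congr 1
    apply List.map_congr_left
    intro x _
    rw [add_zero]
  rw [e1, e2, e3]
  exact hrun

def pvPartials (a : Int) : List Int → List Int
  | [] => []
  | x :: xs => (a + x) :: pvPartials (a + x) xs

lemma pvFold_eq (s : List Int) : ∀ (pr : List Int) (a : Int),
    s.foldl (fun (st : List Int × Int) x => (st.1 ++ [st.2 + x], st.2 + x)) (pr, a)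
      = (pr ++ pvPartials a s, a + s.sum) := by
  induction s with
  | nil => intro pr a; simp [pvPartials]
  | cons x xs ih =>
    intro pr a
    simp only [List.foldl_cons]
    rw [ih]
    simp [pvPartials]
    omega

lemma pvPartials_length (a : Int) (s : List Int) : (pvPartials a s).length = s.length := by
  induction s generalizing a with
  | nil => simp [pvPartials]
  | cons x xs ih => simp [pvPartials, ih]

lemma pvPartials_getElem? : ∀ (s : List Int) (a : Int) (k : Nat), k < s.length →
    (pvPartials a s)[k]? = some (a + (s.take (k + 1)).sum) := by
  intro s
  induction s with
  | nil => intro a k h; cases h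
  | cons x xs ih =>
    intro a k h
    cases k with
    | zero => simp [pvPartials]
    | succ k =>
      have h' : k < xs.length := by simpa using h
      simp only [pvPartials, List.getElem?_cons_succ]
      rw [ih (a + x) k h']
      simp [List.take_succ_cons]
      omega

lemma pvPfx_get (s : List Int) (j : Int) (h0 : 0 ≤ j) (h1 : j ≤ (s.length : Int)) :
    PySem.List.pyGetD (0 :: pvPartials 0 s) j 0 = (s.take j.toNat).sum := by
  rw [PySem.List.pyGetD_eq_getElem _ _ h0 (by simp [pvPartials_length]; omega)]
  have hlt : j.toNat < (0 :: pvPartials 0 s).length := by simp [pvPartials_length]; omega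
  have h5 : (0 :: pvPartials 0 s)[j.toNat]? = some ((s.take j.toNat).sum) := by
    rcases hk : j.toNat with _ | k
    · simp
    · have hkl : k < s.length := by omega
      rw [List.getElem?_cons_succ, pvPartials_getElem? s 0 k hkl]
      norm_num
  exact (List.getElem_eq_iff hlt).mpr h5

lemma pvMono (s : List Int) (hs : s.Pairwise (· ≤ ·)) :
    ∀ (i j : Nat) (hi : i < s.length) (hj : j < s.length), i ≤ j → s[i] ≤ s[j] := by
  intro i j hi hj hij
  rcases Nat.lt_or_ge i j with h | h
  · exact List.pairwise_iff_getElem.mp hs i j hi hj h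
  · have : i = j := by omega
    subst this
    exact le_refl _

theorem pvCLL_spec (s : List Int) (t : Int) (hs : s.Pairwise (· ≤ ·)) :
    ∀ (fuel : Nat) (lo hi : Int), (hi - lo).toNat ≤ fuel → 0 ≤ lo → lo ≤ hi → hi ≤ (s.length : Int) →
    (∀ (i : Nat) (h : i < s.length), (i : Int) < lo → s[i] < t) →
    (∀ (i : Nat) (h : i < s.length), hi ≤ (i : Int) → t ≤ s[i]) →
    0 ≤ pvCountLessLoop s t lo hi ∧ pvCountLessLoop s t lo hi ≤ (s.length : Int) ∧
    (∀ (i : Nat) (h : i < s.length), (i : Int) < pvCountLessLoop s t lo hi → s[i] < t) ∧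
    (∀ (i : Nat) (h : i < s.length), pvCountLessLoop s t lo hi ≤ (i : Int) → t ≤ s[i]) := by
  intro fuel
  induction fuel with
  | zero =>
    intro lo hi hf h0 hlh hhi hlow hhigh
    have hnlt : ¬ lo < hi := by omega
    rw [pvCountLessLoop, dif_neg hnlt]
    exact ⟨h0, by omega, hlow, fun i h hle => hhigh i h (by omega)⟩
  | succ m ih =>
    intro lo hi hf h0 hlh hhi hlow hhigh
    rw [pvCountLessLoop]
    by_cases hlt : lo < hi
    · rw [dif_pos hlt]
      have hb := PySem.Int.floordiv_two_mid_bounds (le_of_lt hlt)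
      have hmhi : PySem.Int.floordiv (lo + hi) 2 < hi := by
        rw [PySem.Int.floordiv_lt_iff_lt_mul (by omega)]; omega
      set mid := PySem.Int.floordiv (lo + hi) 2 with hmid
      have hmlen : mid < (s.length : Int) := by omega
      have hmt : mid.toNat < s.length := by omega
      have hmtc : (mid.toNat : Int) = mid := Int.toNat_of_nonneg (by omega)
      have hget : PySem.List.pyGetD s mid 0 = s[mid.toNat] :=
        PySem.List.pyGetD_eq_getElem s 0 (by omega) hmlen
      by_cases hc : PySem.List.pyGetD s mid 0 < t
      · rw [if_pos hc]
        rw [hget] at hc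
        apply ih (mid + 1) hi (by omega) (by omega) (by omega) hhi _ hhigh
        intro i h hilt
        have : i ≤ mid.toNat := by omega
        exact lt_of_le_of_lt (pvMono s hs i mid.toNat h hmt this) hc
      · rw [if_neg hc]
        rw [hget] at hc
        rw [not_lt] at hc
        apply ih lo mid (by omega) h0 (by omega) (by omega) hlow _
        intro i h hile
        have : mid.toNat ≤ i := by omega
        exact le_trans hc (pvMono s hs mid.toNat i hmt h this)
    · rw [dif_neg hlt]
      exact ⟨h0, by omega, hlow, fun i h hle => hhigh i h (by omega)⟩

theorem pvCountLess_spec (s : List Int) (t : Int) (hs : s.Pairwise (· ≤ ·)) :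
    0 ≤ pvCountLess s t ∧ pvCountLess s t ≤ (s.length : Int) ∧
    (∀ (i : Nat) (h : i < s.length), (i : Int) < pvCountLess s t → s[i] < t) ∧
    (∀ (i : Nat) (h : i < s.length), pvCountLess s t ≤ (i : Int) → t ≤ s[i]) := by
  unfold pvCountLess
  rw [PySem.List.len_eq]
  exact pvCLL_spec s t hs ((s.length : Int) - 0).toNat 0 (s.length : Int) (le_refl _)
    (le_refl _) (by omega) (by omega)
    (fun i h hilt => absurd hilt (by omega))
    (fun i h hle => absurd hle (by omega))

lemma pvSumMapAdd (l : List Int) (d : Int) : (l.map (fun x => x + d)).sum = l.sum + l.length * d := by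
  induction l with
  | nil => simp
  | cons x xs ih =>
    simp only [List.map_cons, List.sum_cons, ih, List.length_cons]
    push_cast
    ring

lemma pvSumMapNegAdd (l : List Int) (d : Int) :
    (l.map (fun x => -(x + d))).sum = -l.sum - l.length * d := by
  induction l with
  | nil => simp
  | cons x xs ih =>
    simp only [List.map_cons, List.sum_cons, ih, List.length_cons]
    push_cast
    ring

lemma pvQuery_val (arr s : List Int) (d : Int) (hs : s.Pairwise (· ≤ ·)) (hperm : s.Perm arr) :
    s.sum - 2 * (s.take (pvCountLess s (-d)).toNat).sum + ((s.length : Int) - 2 * pvCountLess s (-d)) * d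
      = pvSpec d arr := by
  obtain ⟨h0, hle, hlow, hhigh⟩ := pvCountLess_spec s (-d) hs
  set j := pvCountLess s (-d) with hj
  set k := j.toNat with hk
  have hkj : (k : Int) = j := Int.toNat_of_nonneg h0
  have hkl : k ≤ s.length := by omega
  have hR : pvSpec d arr = ((s.take k).map (fun x => |x + d|)).sum + ((s.drop k).map (fun x => |x + d|)).sum := by
    unfold pvSpec
    rw [← List.sum_append, ← List.map_append, List.take_append_drop]
    exact ((hperm.map _).sum_eq).symm
  have htk : ((s.take k).map (fun x => |x + d|)).sum = -(s.take k).sum - ((s.take k).length : Int) * d := by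
    rw [show ((s.take k).map (fun x => |x + d|)) = ((s.take k).map (fun x => -(x + d))) from
      List.map_congr_left (by
        intro x hx
        obtain ⟨i, hm, rfl⟩ := List.mem_take_iff_getElem.mp hx
        have hi : i < s.length := by omega
        have := hlow i hi (by omega)
        rw [abs_of_neg (by omega)])]
    exact pvSumMapNegAdd _ d
  have hdk : ((s.drop k).map (fun x => |x + d|)).sum = (s.drop k).sum + ((s.drop k).length : Int) * d := by
    rw [show ((s.drop k).map (fun x => |x + d|)) = ((s.drop k).map (fun x => x + d)) from
      List.map_congr_left (by
        intro x hx
        obtain ⟨i, hm, rfl⟩ := List.mem_drop_iff_getElem.mp hx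
        have := hhigh (k + i) (by omega) (by push_cast; omega)
        rw [abs_of_nonneg (by omega)])]
    exact pvSumMapAdd _ d
  have hTD : (s.take k).sum + (s.drop k).sum = s.sum := by
    rw [← List.sum_append, List.take_append_drop]
  have hlt : ((s.take k).length : Int) = (k : Int) := by
    rw [List.length_take]; push_cast; omega
  have hld : ((s.drop k).length : Int) = (s.length : Int) - (k : Int) := by
    rw [List.length_drop]; omega
  rw [hR, htk, hdk, hlt, hld, hkj]
  have : (s.drop k).sum = s.sum - (s.take k).sum := by omega
  rw [this]
  ring

theorem pvAltRun_spec (arr s pfx : List Int) (total : Int)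
    (hs : s = PySem.List.sorted arr (fun x => x) false)
    (hp : pfx = 0 :: pvPartials 0 s) (ht : total = s.sum) :
    ∀ (qs : List Int) (d : Int),
      pvAltRun qs s pfx (s.length : Int) total d = pvSpecList qs arr d := by
  intro qs
  induction qs with
  | nil => intro d; simp [pvAltRun, pvSpecList]
  | cons q qs ih =>
    intro d
    have hsort : s.Pairwise (· ≤ ·) := by rw [hs]; exact PySem.List.sorted_pairwise arr (fun x => x)
    have hperm : s.Perm arr := by rw [hs]; exact PySem.List.sorted_perm arr (fun x => x) false
    obtain ⟨h0, hle, _, _⟩ := pvCountLess_spec s (-(d + q)) hsort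
    rw [pvAltRun, pvSpecList]
    congr 1
    · rw [hp, pvPfx_get s _ h0 hle, ht]
      exact pvQuery_val arr s (d + q) hsort hperm
    · exact ih (d + q)

theorem pvB_eq (arr queries : List Int) :
    playingWithNumbers_alt arr queries = pvSpecList queries arr 0 := by
  unfold playingWithNumbers_alt
  dsimp only
  set s := PySem.List.sorted arr (fun x => x) false with hs
  rw [pvFold_eq s [0] 0]
  have hpfx : ([0] ++ pvPartials 0 s, 0 + s.sum).1 = 0 :: pvPartials 0 s := by simp
  rw [hpfx]
  have hlen : PySem.List.len s = (s.length : Int) := PySem.List.len_eq s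
  rw [hlen]
  have htot : PySem.List.pyGetD (0 :: pvPartials 0 s) (s.length : Int) 0 = s.sum := by
    rw [pvPfx_get s _ (by omega) (le_refl _)]
    simp
  rw [htot]
  exact pvAltRun_spec arr s (0 :: pvPartials 0 s) s.sum hs rfl rfl queries 0

-- ===== VERDICT (by name: the statement is the Claim_ definition above) =====
theorem playingWithNumbers_spec : Claim_equal_playingWithNumbers := by
  intro arr queries _
  unfold Spec_playingWithNumbers
  rw [pvA_eq, pvB_eq]
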